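-- pv_equiv track=rewrite | github.com/janluke/embfile | src/embfile/formats/bin.py | _bom_free_version
-- ===== SOURCE A (Python) =====
-- def _bom_free_version(encoding: str) -> str:
--     """ Given an utf encoding, returns a BOM-free version of it (little-endian version) """
--
--     def utf_aliases(num):
--         return {fmt % num for fmt in ['u%d', 'utf%d', 'utf-%d', 'utf_%d']}
--
--     encoding = encoding.lower()
--     if encoding in utf_aliases(16):
--         return 'utf_16_le'
--     if encoding in utf_aliases(32):
--         return 'utf_32_le'
--     return encoding
-- ===== SOURCE B (Python) =====
-- def _bom_free_version(encoding: str) -> str: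
--     """ Given an utf encoding, returns a BOM-free version of it (little-endian version) """
--     enc = encoding.lower()
--     for prefix in ('utf_', 'utf-', 'utf', 'u'):
--         if enc.startswith(prefix):
--             rest = enc[len(prefix):]
--             if rest in ('16', '32'):
--                 return 'utf_%s_le' % rest
--             break
--     return enc
-- ===== Notes on version B (the rewrite author's own statement) =====
-- stated objective: idiomatic
-- what changed: B parses the encoding name (strip the longest matching utf prefix and inspect the numeric remainder) instead of generating all eight aliases and testing two set memberships.
import Mathlib
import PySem

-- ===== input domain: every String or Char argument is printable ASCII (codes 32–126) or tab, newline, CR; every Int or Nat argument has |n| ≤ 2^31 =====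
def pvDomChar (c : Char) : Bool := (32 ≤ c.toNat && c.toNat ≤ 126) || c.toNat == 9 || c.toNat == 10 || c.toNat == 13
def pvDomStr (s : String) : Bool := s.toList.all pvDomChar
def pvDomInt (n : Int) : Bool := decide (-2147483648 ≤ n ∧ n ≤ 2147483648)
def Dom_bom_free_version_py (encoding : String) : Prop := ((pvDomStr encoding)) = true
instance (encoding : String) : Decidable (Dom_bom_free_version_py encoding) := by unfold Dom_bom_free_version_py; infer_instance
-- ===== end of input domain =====

-- B parses the lowercased name (strip the first matching utf prefix, inspect the numeric
-- remainder) instead of A's generate-all-aliases-then-two-set-membership-tests; objective: more idiomatic, same cost.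

-- ===== PORT A =====
-- 'fmt % num' for fmt = p ++ "%d" is exactly p ++ str(num); ported as such (exact for every int)
def utf_aliases (num : Int) : PySem.Set String :=
  PySem.Set.ofList (["u", "utf", "utf-", "utf_"].map
    (fun p => String.ofList (p.toList ++ (PySem.Int.toStr num).toList)))

def bom_free_version_py (encoding : String) : String :=
  let enc := PySem.Str.lower encoding
  if PySem.Set.contains (utf_aliases 16) enc then "utf_16_le"
  else if PySem.Set.contains (utf_aliases 32) enc then "utf_32_le"
  else enc

-- ===== PORT B =====
-- the for-loop with break = the first matching prefix decides; ported as findSome? over the prefixes.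
-- enc[len(prefix):] drops from the front (non-negative index): exact as List.drop.
-- 'utf_%s_le' % rest is "utf_" ++ rest ++ "_le"; ported as such (exact).
def bom_free_version_py_alt (encoding : String) : String :=
  let enc := PySem.Str.lower encoding
  match ["utf_", "utf-", "utf", "u"].findSome? (fun p =>
      if PySem.Str.startswith enc p then
        some (String.ofList (enc.toList.drop p.toList.length))
      else none) with
  | some rest =>
      if rest ∈ (["16", "32"] : List String) then
        String.ofList ("utf_".toList ++ rest.toList ++ "_le".toList)
      else enc
  | none => enc

-- ===== PRECONDITION & SPEC =====
def Spec_bom_free_version_py (encoding : String) (out : String) : Prop := out = bom_free_version_py_alt encoding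
instance (encoding : String) (out : String) : Decidable (Spec_bom_free_version_py encoding out) := by unfold Spec_bom_free_version_py; infer_instance

-- ===== CLAIM (what is proved, stated in full; the proofs are below) =====
def Claim_equal_bom_free_version_py : Prop := ∀ (encoding : String), Dom_bom_free_version_py encoding → Spec_bom_free_version_py encoding (bom_free_version_py encoding)

-- ===== LEMMAS AND PROOFS =====

-- if enc starts with p and dropping |p| chars leaves r's characters, then enc = p ++ r
theorem eq_of_startswith_drop (t p r : String)
    (h1 : PySem.Str.startswith t p = true)
    (h2 : String.ofList (t.toList.drop p.toList.length) = r) :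
    t = String.ofList (p.toList ++ r.toList) := by
  obtain ⟨u, hu⟩ : p.toList <+: t.toList := by
    simpa [PySem.Chars.startswith_iff] using h1
  have h3 : t.toList.drop p.toList.length = r.toList := by rw [← h2]; simp
  have h4 : t.toList.drop p.toList.length = u := by rw [← hu]; exact List.drop_left
  have h5 : t.toList = p.toList ++ r.toList := by rw [← hu, ← h4, h3]
  calc t = String.ofList t.toList := by simp
    _ = String.ofList (p.toList ++ r.toList) := by rw [h5]

theorem contains16_false (t : String)
    (n1 : t ≠ "u16") (n2 : t ≠ "utf16") (n3 : t ≠ "utf-16") (n4 : t ≠ "utf_16") :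
    t ∉ utf_aliases 16 := by
  have e : utf_aliases 16 = ["u16", "utf16", "utf-16", "utf_16"] := by decide
  rw [e]
  simp [n1, n2, n3, n4]

theorem contains32_false (t : String)
    (n1 : t ≠ "u32") (n2 : t ≠ "utf32") (n3 : t ≠ "utf-32") (n4 : t ≠ "utf_32") :
    t ∉ utf_aliases 32 := by
  have e : utf_aliases 32 = ["u32", "utf32", "utf-32", "utf_32"] := by decide
  rw [e]
  simp [n1, n2, n3, n4]

-- core equality on the already-lowercased string
theorem core_eq (t : String) :
    (if PySem.Set.contains (utf_aliases 16) t then "utf_16_le"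
     else if PySem.Set.contains (utf_aliases 32) t then "utf_32_le"
     else t)
    =
    (match ["utf_", "utf-", "utf", "u"].findSome? (fun p =>
        if PySem.Str.startswith t p then
          some (String.ofList (t.toList.drop p.toList.length))
        else none) with
     | some rest =>
         if rest ∈ (["16", "32"] : List String) then
           String.ofList ("utf_".toList ++ rest.toList ++ "_le".toList)
         else t
     | none => t) := by
  by_cases h1 : PySem.Str.startswith t "utf_" = true
  · by_cases e16 : String.ofList (t.toList.drop ("utf_".toList.length)) = "16"
    · have ht := eq_of_startswith_drop t "utf_" "16" h1 e16; subst ht; decide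
    · by_cases e32 : String.ofList (t.toList.drop ("utf_".toList.length)) = "32"
      · have ht := eq_of_startswith_drop t "utf_" "32" h1 e32; subst ht; decide
      · have c16 := contains16_false t
          (by intro h; subst h; exact absurd h1 (by decide))
          (by intro h; subst h; exact absurd h1 (by decide))
          (by intro h; subst h; exact absurd h1 (by decide))
          (by intro h; subst h; exact e16 (by decide))
        have c32 := contains32_false t
          (by intro h; subst h; exact absurd h1 (by decide))
          (by intro h; subst h; exact absurd h1 (by decide))
          (by intro h; subst h; exact absurd h1 (by decide))
          (by intro h; subst h; exact e32 (by decide))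
        simp at h1 e16 e32
        simp [List.findSome?, h1, c16, c32, e16, e32]
  · by_cases h2 : PySem.Str.startswith t "utf-" = true
    · by_cases e16 : String.ofList (t.toList.drop ("utf-".toList.length)) = "16"
      · have ht := eq_of_startswith_drop t "utf-" "16" h2 e16; subst ht; decide
      · by_cases e32 : String.ofList (t.toList.drop ("utf-".toList.length)) = "32"
        · have ht := eq_of_startswith_drop t "utf-" "32" h2 e32; subst ht; decide
        · have c16 := contains16_false t
            (by intro h; subst h; exact absurd h2 (by decide))
            (by intro h; subst h; exact absurd h2 (by decide))
            (by intro h; subst h; exact e16 (by decide))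
            (by intro h; subst h; exact h1 (by decide))
          have c32 := contains32_false t
            (by intro h; subst h; exact absurd h2 (by decide))
            (by intro h; subst h; exact absurd h2 (by decide))
            (by intro h; subst h; exact e32 (by decide))
            (by intro h; subst h; exact h1 (by decide))
          simp at h1 h2 e16 e32
          simp [List.findSome?, h1, h2, c16, c32, e16, e32]
    · by_cases h3 : PySem.Str.startswith t "utf" = true
      · by_cases e16 : String.ofList (t.toList.drop ("utf".toList.length)) = "16"
        · have ht := eq_of_startswith_drop t "utf" "16" h3 e16; subst ht; decide
        · by_cases e32 : String.ofList (t.toList.drop ("utf".toList.length)) = "32"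
          · have ht := eq_of_startswith_drop t "utf" "32" h3 e32; subst ht; decide
          · have c16 := contains16_false t
              (by intro h; subst h; exact absurd h3 (by decide))
              (by intro h; subst h; exact e16 (by decide))
              (by intro h; subst h; exact h2 (by decide))
              (by intro h; subst h; exact h1 (by decide))
            have c32 := contains32_false t
              (by intro h; subst h; exact absurd h3 (by decide))
              (by intro h; subst h; exact e32 (by decide))
              (by intro h; subst h; exact h2 (by decide))
              (by intro h; subst h; exact h1 (by decide))
            simp at h1 h2 h3 e16 e32
            simp [List.findSome?, h1, h2, h3, c16, c32, e16, e32]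
      · by_cases h4 : PySem.Str.startswith t "u" = true
        · by_cases e16 : String.ofList (t.toList.drop ("u".toList.length)) = "16"
          · have ht := eq_of_startswith_drop t "u" "16" h4 e16; subst ht; decide
          · by_cases e32 : String.ofList (t.toList.drop ("u".toList.length)) = "32"
            · have ht := eq_of_startswith_drop t "u" "32" h4 e32; subst ht; decide
            · have c16 := contains16_false t
                (by intro h; subst h; exact e16 (by decide))
                (by intro h; subst h; exact h3 (by decide))
                (by intro h; subst h; exact h2 (by decide))
                (by intro h; subst h; exact h1 (by decide))
              have c32 := contains32_false t
                (by intro h; subst h; exact e32 (by decide))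
                (by intro h; subst h; exact h3 (by decide))
                (by intro h; subst h; exact h2 (by decide))
                (by intro h; subst h; exact h1 (by decide))
              simp at h1 h2 h3 h4 e16 e32
              simp [List.findSome?, h1, h2, h3, h4, c16, c32, e16, e32]
        · have c16 := contains16_false t
            (by intro h; subst h; exact h4 (by decide))
            (by intro h; subst h; exact h4 (by decide))
            (by intro h; subst h; exact h4 (by decide))
            (by intro h; subst h; exact h4 (by decide))
          have c32 := contains32_false t
            (by intro h; subst h; exact h4 (by decide))
            (by intro h; subst h; exact h4 (by decide))
            (by intro h; subst h; exact h4 (by decide))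
            (by intro h; subst h; exact h4 (by decide))
          simp at h1 h2 h3 h4
          simp [List.findSome?, h1, h2, h3, h4, c16, c32]

-- ===== VERDICT (by name: the statement is the Claim_ definition above) =====
theorem bom_free_version_py_spec : Claim_equal_bom_free_version_py := by
  intro encoding _
  unfold Spec_bom_free_version_py bom_free_version_py bom_free_version_py_alt
  exact core_eq (PySem.Str.lower encoding)
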